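-- pv_equiv track=rewrite | github.com/kankang20/Baekjoon | 02 백준/10 문자열/Python/Prob1316.py | group_word
-- ===== SOURCE A (Python) =====
-- def group_word(word):
--
--     check = []
--     idx = 0
--
--     while idx < len(word):
--
--         temp = word[idx]
--
--         if temp in check:
--             return 0
--
--         check.append(temp)
--
--         while idx < len(word) and temp == word[idx]:
--             idx += 1
--
--     return 1
-- ===== SOURCE B (Python) =====
-- def group_word(word):
--     reps = [c for c, prev in zip(word, [None] + list(word)) if c != prev]
--     return 1 if len(reps) == len(set(reps)) else 0
-- ===== Notes on version B (the rewrite author's own statement) =====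
-- stated objective: idiomatic
-- what changed: B collapses the word into its run representatives in a single comprehension pass (groupby-style zip with the previous character) and then decides grouping by comparing len(reps) with len(set(reps)), instead of A's interleaved index scan that tests each run head against a growing membership list inside the loop.
import Mathlib
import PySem

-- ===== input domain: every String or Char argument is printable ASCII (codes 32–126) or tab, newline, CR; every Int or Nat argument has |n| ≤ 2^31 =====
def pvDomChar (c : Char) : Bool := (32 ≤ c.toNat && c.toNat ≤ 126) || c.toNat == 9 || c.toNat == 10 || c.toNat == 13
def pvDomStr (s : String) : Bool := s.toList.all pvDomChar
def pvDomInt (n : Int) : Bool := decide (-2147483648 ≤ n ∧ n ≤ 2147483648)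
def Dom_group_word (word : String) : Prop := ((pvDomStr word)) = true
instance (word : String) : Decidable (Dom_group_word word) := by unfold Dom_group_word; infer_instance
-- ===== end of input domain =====

-- B collapses the word into its run representatives in one comprehension pass and checks their
-- distinctness with a set, instead of A's interleaved index scan with a growing membership list (idiomatic).

-- ===== PORT A =====
-- outer while: take the run head, test membership in check, append, skip the run (inner while)
def group_word_go (check : List Char) (l : List Char) : Int :=
  match l with
  | [] => 1
  | c :: rest =>
    if check.contains c then 0
    else group_word_go (check ++ [c]) (rest.dropWhile (fun x => x == c))
termination_by l.length
decreasing_by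
  simp only [List.length_cons]
  exact Nat.lt_succ_of_le (List.length_dropWhile_le _ _)

def group_word (word : String) : Int := group_word_go [] word.toList

-- ===== PORT B =====
-- reps = [c for c, prev in zip(word, [None] + list(word)) if c != prev]
def pvRuns (l : List Char) : List Char :=
  ((l.zip ((none : Option Char) :: l.map some)).filter (fun p => some p.1 != p.2)).map (fun p => p.1)

def group_word_alt (word : String) : Int :=
  let reps := pvRuns word.toList
  if reps.length == (PySem.Set.ofList reps).length then 1 else 0

-- ===== PRECONDITION & SPEC =====
def Spec_group_word (word : String) (out : Int) : Prop := out = group_word_alt word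
instance (word : String) (out : Int) : Decidable (Spec_group_word word out) := by unfold Spec_group_word; infer_instance

-- ===== CLAIM (what is proved, stated in full; the proofs are below) =====
def Claim_equal_group_word : Prop := ∀ (word : String), Dom_group_word word → Spec_group_word word (group_word word)

-- ===== LEMMAS AND PROOFS =====

-- canonical run-collapse used to relate the two ports
def pvCanonRuns (l : List Char) : List Char :=
  match l with
  | [] => []
  | c :: rest => c :: pvCanonRuns (rest.dropWhile (fun x => x == c))
termination_by l.length
decreasing_by
  simp only [List.length_cons]
  exact Nat.lt_succ_of_le (List.length_dropWhile_le _ _)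

-- pvRuns with an arbitrary previous element
def pvRepsAux (prev : Option Char) (l : List Char) : List Char :=
  ((l.zip (prev :: l.map some)).filter (fun p => some p.1 != p.2)).map (fun p => p.1)

theorem pvRepsAux_cons (prev : Option Char) (c : Char) (rest : List Char) :
    pvRepsAux prev (c :: rest)
      = (if some c != prev then [c] else []) ++ pvRepsAux (some c) rest := by
  simp only [pvRepsAux, List.map_cons, List.zip_cons_cons, List.filter_cons]
  split_ifs <;> simp

theorem pvRepsAux_eq_canon :
    ∀ n (l : List Char), l.length ≤ n →
      pvRepsAux none l = pvCanonRuns l ∧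
      ∀ c, pvRepsAux (some c) l = pvCanonRuns (l.dropWhile (fun x => x == c)) := by
  intro n
  induction n with
  | zero =>
    intro l hl
    have : l = [] := List.eq_nil_of_length_eq_zero (Nat.le_zero.mp hl)
    subst this
    constructor
    · simp [pvRepsAux, pvCanonRuns]
    · intro c; simp [pvRepsAux, pvCanonRuns]
  | succ n ih =>
    intro l hl
    match l with
    | [] =>
      constructor
      · simp [pvRepsAux, pvCanonRuns]
      · intro c; simp [pvRepsAux, pvCanonRuns]
    | d :: rest =>
      have hrest : rest.length ≤ n := Nat.lt_succ_iff.mp (by simpa using hl)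
      have hdrop : ∀ c, pvRepsAux (some c) rest
          = pvCanonRuns (rest.dropWhile (fun x => x == c)) := (ih rest hrest).2
      constructor
      · rw [pvRepsAux_cons]
        simp only [bne_iff_ne, ne_eq, reduceCtorEq, not_false_eq_true, if_pos]
        rw [hdrop d]
        rw [pvCanonRuns]
        simp
      · intro c
        by_cases hdc : d = c
        · subst hdc
          rw [pvRepsAux_cons]
          have : (d :: rest).dropWhile (fun x => x == d) = rest.dropWhile (fun x => x == d) := by
            simp [List.dropWhile]
          rw [this]
          simpa using hdrop d
        · rw [pvRepsAux_cons]
          have h1 : (some d != some c) = true := by simp [hdc]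
          rw [if_pos h1]
          have : (d :: rest).dropWhile (fun x => x == c) = d :: rest := by
            have hb : (d == c) = false := beq_eq_false_iff_ne.mpr hdc
            simp [List.dropWhile, hb]
          rw [this, hdrop d, pvCanonRuns]
          simp

theorem pvRuns_eq_canon (l : List Char) : pvRuns l = pvCanonRuns l :=
  (pvRepsAux_eq_canon l.length l le_rfl).1

-- A's loop returns 1 iff the run representatives are distinct and disjoint from check
theorem group_word_go_eq :
    ∀ n (l : List Char), l.length ≤ n → ∀ (check : List Char),
      group_word_go check l
        = if (pvCanonRuns l).Nodup ∧ ∀ x ∈ pvCanonRuns l, x ∉ check then 1 else 0 := by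
  intro n
  induction n with
  | zero =>
    intro l hl check
    have : l = [] := List.eq_nil_of_length_eq_zero (Nat.le_zero.mp hl)
    subst this
    simp [group_word_go, pvCanonRuns]
  | succ n ih =>
    intro l hl check
    match l with
    | [] => simp [group_word_go, pvCanonRuns]
    | c :: rest =>
      have hrest : rest.length ≤ n := Nat.lt_succ_iff.mp (by simpa using hl)
      have hdl : (rest.dropWhile (fun x => x == c)).length ≤ n :=
        le_trans (List.length_dropWhile_le _ _) hrest
      rw [group_word_go, pvCanonRuns]
      by_cases hc : c ∈ check
      · rw [if_pos (by simpa using hc)]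
        rw [if_neg]
        rintro ⟨-, hall⟩
        exact hall c (by simp) hc
      · rw [if_neg (by simpa using hc)]
        rw [ih _ hdl (check ++ [c])]
        congr 1
        simp only [List.nodup_cons, List.mem_append, List.mem_cons,
          forall_eq_or_imp, not_or, eq_iff_iff]
        constructor
        · rintro ⟨hnd, hall⟩
          exact ⟨⟨fun hmem => (hall _ hmem).2.1 rfl, hnd⟩, hc, fun x hx => (hall x hx).1⟩
        · rintro ⟨⟨hcmem, hnd⟩, -, hall⟩
          exact ⟨hnd, fun x hx => ⟨hall x hx, fun h => hcmem (h ▸ hx), by simp⟩⟩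

-- length of set(xs) equals length of xs iff xs has no duplicates
theorem len_ofList_eq_iff (xs : List Char) :
    ((PySem.Set.ofList xs).length = xs.length) ↔ xs.Nodup := by
  induction xs using List.reverseRecOn with
  | nil => simp [PySem.Set.ofList_nil]
  | append_singleton xs x ih =>
    rw [PySem.Set.ofList_append_singleton]
    by_cases hx : x ∈ xs
    · have hmem : x ∈ PySem.Set.ofList xs := (PySem.Set.mem_ofList xs x).mpr hx
      have hadd : PySem.Set.add (PySem.Set.ofList xs) x = PySem.Set.ofList xs := by
        simp [PySem.Set.add, PySem.Set.contains, hmem]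
      rw [hadd]
      have hle : (PySem.Set.ofList xs).length ≤ xs.length := PySem.Set.length_ofList_le xs
      simp only [List.length_append, List.length_singleton]
      constructor
      · intro h; omega
      · intro h
        exfalso
        simp only [List.nodup_append] at h
        exact h.2.2 x hx x (List.mem_singleton_self x) rfl
    · have hmem : x ∉ PySem.Set.ofList xs := fun h => hx ((PySem.Set.mem_ofList xs x).mp h)
      have hadd : PySem.Set.add (PySem.Set.ofList xs) x = PySem.Set.ofList xs ++ [x] := by
        simp [PySem.Set.add, PySem.Set.contains, hmem]
      rw [hadd]
      simp only [List.length_append, List.length_singleton]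
      rw [List.nodup_append]
      constructor
      · intro h
        refine ⟨ih.mp (by omega), List.nodup_singleton x, ?_⟩
        intro a ha b hb
        rw [List.mem_singleton] at hb
        subst hb
        exact fun he => hx (he ▸ ha)
      · rintro ⟨hnd, -, -⟩
        have := ih.mpr hnd
        omega

-- ===== VERDICT (by name: the statement is the Claim_ definition above) =====
theorem group_word_spec : Claim_equal_group_word := by
  intro word _
  unfold Spec_group_word group_word group_word_alt
  rw [group_word_go_eq word.toList.length word.toList le_rfl []]
  rw [pvRuns_eq_canon]
  simp only [List.not_mem_nil, not_false_eq_true, implies_true, and_true]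
  by_cases h : (pvCanonRuns word.toList).Nodup
  · rw [if_pos h, if_pos]
    exact beq_iff_eq.mpr ((len_ofList_eq_iff _).mpr h).symm
  · rw [if_neg h, if_neg]
    intro hb
    exact h ((len_ofList_eq_iff _).mp (beq_iff_eq.mp hb).symm)
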